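-- pv_equiv track=rewrite | github.com/bu119/Algorithm | 프로그래머스/2/389479. 서버 증설 횟수/서버 증설 횟수.py | solution
-- ===== SOURCE A (Python) =====
-- from collections import deque
--
-- def solution(players, m, k):
--     # 서버 증설 횟수 저장
--     answer = 0
--     # 증설된 서버들의 남은 시간 저장
--     servers = deque()
--     for player in players:
--         # 증설되어야하는 서버 수 (필요한 서버 수 - 중설된 서버 수)
--         required_servers = player//m - len(servers)
--         # 서버가 추가로 필요하면
--         if required_servers > 0:
--             # 서버를 필요한 만큼 추가하고
--             for i in range(required_servers):
--                 servers.append(k)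
--             # 서버 증설 횟수도 추가
--             answer += required_servers
--         # 서버 시간 감소 시키기
--         for _ in range(len(servers)):
--             server_time = servers.popleft()
--             if server_time > 1:
--                 servers.append(server_time - 1)
--
--     return answer
-- ===== SOURCE B (Python) =====
-- from collections import deque
--
-- def solution(players, m, k):
--     # Batch sweep: one deque entry per expansion batch (expiry hour, count),
--     # active server count maintained incrementally -> O(n) amortized.
--     life = max(k, 1)  # a server added at hour i serves hours i .. i+life-1
--     batches = deque()
--     active = 0
--     answer = 0
--     for i, p in enumerate(players):
--         while batches and batches[0][0] <= i:
--             active -= batches.popleft()[1]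
--         need = p // m - active
--         if need > 0:
--             answer += need
--             active += need
--             batches.append((i + life, need))
--     return answer
-- ===== Notes on version B (the rewrite author's own statement) =====
-- stated objective: faster
-- what changed: A keeps one deque entry per active server and decrements every entry every hour; B keeps one (expiry hour, count) entry per expansion batch, sweeps expired batches off the front and maintains the active-server count incrementally, removing the per-hour scan over all servers.
import Mathlib
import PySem

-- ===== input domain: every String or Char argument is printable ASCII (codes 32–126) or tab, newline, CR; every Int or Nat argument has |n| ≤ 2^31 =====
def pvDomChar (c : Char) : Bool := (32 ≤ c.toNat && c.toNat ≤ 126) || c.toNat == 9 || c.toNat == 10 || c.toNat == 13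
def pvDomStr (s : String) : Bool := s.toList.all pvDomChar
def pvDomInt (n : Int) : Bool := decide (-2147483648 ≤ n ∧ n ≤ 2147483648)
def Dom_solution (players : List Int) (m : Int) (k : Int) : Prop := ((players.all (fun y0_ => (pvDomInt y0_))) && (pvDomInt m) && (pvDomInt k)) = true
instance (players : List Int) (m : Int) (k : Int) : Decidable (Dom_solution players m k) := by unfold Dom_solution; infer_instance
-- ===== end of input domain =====

-- B replaces A's per-server deque (decremented element by element every hour, O(n·S))
-- by a deque of (expiry hour, count) batches swept once, O(n) amortized; return value only.

-- ===== PORT A =====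
-- inner loop: for _ in range(len(servers)): t = servers.popleft(); if t > 1: servers.append(t-1)
def solDecLoop : Nat → List Int → List Int
  | 0, q => q
  | _+1, [] => []
  | n+1, t :: rest => solDecLoop n (if t > 1 then rest ++ [t - 1] else rest)

def solALoop (m k : Int) : List Int → Int → List Int → Int
  | [], ans, _ => ans
  | p :: rest, ans, servers =>
    let required := PySem.Int.floordiv p m - (servers.length : Int)
    let st := if required > 0 then
                (ans + required, servers ++ List.replicate required.toNat k)
              else (ans, servers)
    solALoop m k rest st.1 (solDecLoop st.2.length st.2)

def solution (players : List Int) (m : Int) (k : Int) : Int :=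
  solALoop m k players 0 []

-- ===== PORT B =====
-- while batches and batches[0][0] <= i: active -= batches.popleft()[1]
def solPop (i : Int) : List (Int × Int) → Int → List (Int × Int) × Int
  | [], active => ([], active)
  | b :: rest, active =>
    if b.1 ≤ i then solPop i rest (active - b.2) else (b :: rest, active)

def solBLoop (m life : Int) : List Int → Int → Int → List (Int × Int) → Int → Int
  | [], _, ans, _, _ => ans
  | p :: rest, i, ans, batches, active =>
    let st := solPop i batches active
    let need := PySem.Int.floordiv p m - st.2
    if need > 0 then
      solBLoop m life rest (i + 1) (ans + need) (st.1 ++ [(i + life, need)]) (st.2 + need)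
    else
      solBLoop m life rest (i + 1) ans st.1 st.2

def solution_alt (players : List Int) (m : Int) (k : Int) : Int :=
  solBLoop m (max k 1) players 0 0 [] 0

-- ===== PRECONDITION & SPEC =====
-- Pre_ excludes only the inputs where Python A raises ZeroDivisionError (a division p//m
-- with m = 0 happens whenever players is nonempty); B divides there too.
def Pre_solution (players : List Int) (m : Int) (k : Int) : Prop := players = [] ∨ m ≠ 0
instance (players : List Int) (m : Int) (k : Int) : Decidable (Pre_solution players m k) := by
  unfold Pre_solution; infer_instance

def pvWitness_solution : List Int × Int × Int := ([3, 2, 5], 1, 2)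

def Spec_solution (players : List Int) (m : Int) (k : Int) (out : Int) : Prop := out = solution_alt players m k
instance (players : List Int) (m : Int) (k : Int) (out : Int) : Decidable (Spec_solution players m k out) := by unfold Spec_solution; infer_instance

-- ===== CLAIM (what is proved, stated in full; the proofs are below) =====
def Claim_equal_solution : Prop := ∀ (players : List Int) (m : Int) (k : Int), Dom_solution players m k → Pre_solution players m k → Spec_solution players m k (solution players m k)

-- ===== LEMMAS AND PROOFS =====

-- A's deque at the start of hour i, reconstructed from B's batch list:
-- each still-alive batch (e, c) contributes c servers with e - i hours left.
def solRep (i : Int) (bs : List (Int × Int)) : List Int :=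
  (bs.filter (fun b => i < b.1)).flatMap (fun b => List.replicate b.2.toNat (b.1 - i))

def solTick (t : Int) : Option Int := if t > 1 then some (t - 1) else none

theorem solDecLoop_eq (q : List Int) : ∀ r, solDecLoop q.length (q ++ r) = r ++ q.filterMap solTick := by
  induction q with
  | nil => intro r; simp [solDecLoop]
  | cons t q ih =>
    intro r
    by_cases h : t > 1 <;>
      simp [solDecLoop, solTick, h, List.filterMap_cons, ih (r ++ [t - 1]), ih r]

theorem solPop_eq (i : Int) (bs : List (Int × Int))
    (hs : List.Pairwise (fun a b => a.1 < b.1) bs) :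
    solPop i bs ((bs.map Prod.snd).sum) =
      (bs.filter (fun b => i < b.1), ((bs.filter (fun b => i < b.1)).map Prod.snd).sum) := by
  induction bs with
  | nil => simp [solPop]
  | cons b rest ih =>
    rcases List.pairwise_cons.mp hs with ⟨hb, hrest⟩
    by_cases h : b.1 ≤ i
    · have : b.2 + (rest.map Prod.snd).sum - b.2 = (rest.map Prod.snd).sum := by ring
      simpa [solPop, h, this, not_lt.mpr h] using ih hrest
    · have hall : ∀ x ∈ b :: rest, decide (i < x.1) = true := by
        intro x hx
        rcases List.mem_cons.mp hx with hx | hx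
        · subst hx; simp; omega
        · have := hb x hx; simp; omega
      simp [solPop, h, List.filter_eq_self.mpr hall]

theorem solRep_length (i : Int) (bs : List (Int × Int)) (hpos : ∀ b ∈ bs, 0 < b.2) :
    ((solRep i bs).length : Int) = ((bs.filter (fun b => i < b.1)).map Prod.snd).sum := by
  induction bs with
  | nil => simp [solRep]
  | cons b rest ih =>
    have hb := hpos b (by simp)
    have ih' := ih (fun x hx => hpos x (by simp [hx]))
    by_cases h : i < b.1
    · simp only [solRep, List.filter_cons, h, decide_true, if_true, List.flatMap_cons,
        List.map_cons, List.sum_cons, List.length_append, List.length_replicate] at *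
      push_cast
      omega
    · simpa [solRep, List.filter_cons, h] using ih'

theorem solRep_filterMap (i : Int) (bs : List (Int × Int)) :
    (solRep i bs).filterMap solTick = solRep (i + 1) bs := by
  induction bs with
  | nil => simp [solRep]
  | cons b rest ih =>
    have hrep : (List.replicate b.2.toNat (b.1 - i)).filterMap solTick =
        if i + 1 < b.1 then List.replicate b.2.toNat (b.1 - (i + 1)) else [] := by
      by_cases h : i + 1 < b.1
      · have h1 : b.1 - i > 1 := by omega
        have h2 : b.1 - i - 1 = b.1 - (i + 1) := by ring
        simp [solTick, h1, h, h2, List.filterMap_replicate]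
      · have h1 : ¬ (b.1 - i > 1) := by omega
        simp [solTick, h1, h, List.filterMap_replicate]
    simp only [solRep] at ih ⊢
    by_cases h : i < b.1
    · by_cases h2 : i + 1 < b.1 <;>
        simp [List.filter_cons, h, h2, List.flatMap_cons, List.filterMap_append, hrep, ih]
    · have h2 : ¬ i + 1 < b.1 := by omega
      simpa [List.filter_cons, h, h2] using ih

theorem solRep_refilter (i j : Int) (bs : List (Int × Int)) (hij : i ≤ j) :
    solRep j (bs.filter (fun b => i < b.1)) = solRep j bs := by
  unfold solRep
  rw [List.filter_filter]
  congr 1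
  apply List.filter_congr
  intro b _
  by_cases h : j < b.1
  · have : i < b.1 := by omega
    simp [h, this]
  · simp [h]

theorem sol_main (m k : Int) (rest : List Int) : ∀ (i ans : Int) (bs : List (Int × Int)),
    List.Pairwise (fun a b => a.1 < b.1) bs →
    (∀ b ∈ bs, 0 < b.2) →
    (∀ b ∈ bs, b.1 < i + max k 1) →
    solALoop m k rest ans (solRep i bs) =
      solBLoop m (max k 1) rest i ans bs ((bs.map Prod.snd).sum) := by
  induction rest with
  | nil => intro i ans bs _ _ _; simp [solALoop, solBLoop]
  | cons p rest ih =>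
    intro i ans bs hs hpos hbd
    have hfsub : List.Sublist (bs.filter (fun b => i < b.1)) bs := List.filter_sublist
    have hs' : List.Pairwise (fun a b : Int × Int => a.1 < b.1) (bs.filter (fun b => i < b.1)) :=
      hs.sublist hfsub
    have hpos' : ∀ b ∈ bs.filter (fun b => i < b.1), 0 < b.2 :=
      fun b hb => hpos b (hfsub.mem hb)
    have hbd' : ∀ b ∈ bs.filter (fun b => i < b.1), b.1 < i + max k 1 :=
      fun b hb => hbd b (hfsub.mem hb)
    have hlen := solRep_length i bs hpos
    have hpop := solPop_eq i bs hs
    have hdec : ∀ q : List Int, solDecLoop q.length q = q.filterMap solTick := by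
      intro q; simpa using solDecLoop_eq q []
    simp only [solALoop, solBLoop, hpop, hlen]
    set need := PySem.Int.floordiv p m - ((bs.filter (fun b => i < b.1)).map Prod.snd).sum with hneed
    by_cases h : need > 0
    · simp only [h, if_true]
      have hservers :
          solDecLoop (solRep i bs ++ List.replicate need.toNat k).length
              (solRep i bs ++ List.replicate need.toNat k) =
            solRep (i + 1) ((bs.filter (fun b => i < b.1)) ++ [(i + max k 1, need)]) := by
        rw [hdec, List.filterMap_append, solRep_filterMap]
        rw [← solRep_refilter i (i + 1) bs (by omega)]
        unfold solRep
        rw [List.filter_append, List.flatMap_append]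
        congr 1
        by_cases hk : k > 1
        · have h1 : i + 1 < i + max k 1 := by omega
          have h2 : i + max k 1 - (i + 1) = k - 1 := by omega
          simp [solTick, hk, h1, h2, List.filterMap_replicate]
        · have h1 : ¬ (i + 1 < i + max k 1) := by omega
          simp [solTick, hk, h1, List.filterMap_replicate]
      rw [hservers]
      have hsum : ((((bs.filter (fun b => i < b.1)) ++ [(i + max k 1, need)]).map Prod.snd).sum) =
          ((bs.filter (fun b => i < b.1)).map Prod.snd).sum + need := by
        simp
      rw [← hsum]
      apply ih
      · rw [List.pairwise_append]
        refine ⟨hs', List.pairwise_singleton _ _, ?_⟩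
        intro a ha b hb
        obtain rfl := List.mem_singleton.mp hb
        exact hbd' a ha
      · intro b hb
        rcases List.mem_append.mp hb with hb | hb
        · exact hpos' b hb
        · obtain rfl := List.mem_singleton.mp hb
          exact h
      · intro b hb
        rcases List.mem_append.mp hb with hb | hb
        · have := hbd' b hb; omega
        · obtain rfl := List.mem_singleton.mp hb
          show i + max k 1 < i + 1 + max k 1
          omega
    · simp only [h, if_false]
      have hservers : solDecLoop (solRep i bs).length (solRep i bs) =
          solRep (i + 1) (bs.filter (fun b => i < b.1)) := by
        rw [hdec, solRep_filterMap, solRep_refilter i (i + 1) bs (by omega)]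
      rw [hservers]
      apply ih
      · exact hs'
      · exact hpos'
      · intro b hb; have := hbd' b hb; omega

-- ===== VERDICT (by name: the statement is the Claim_ definition above) =====
theorem solution_spec : Claim_equal_solution := by
  intro players m k _ _
  unfold Spec_solution solution solution_alt
  simpa [solRep] using sol_main m k players 0 0 [] (by simp) (by simp) (by simp)
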